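-- pv_equiv track=rewrite | github.com/shavi-jay/the-everything-machine | grokking/sparse_parity_pretrain_finetune.py | get_symmetric_difference_multitask_Ss
-- ===== SOURCE A (Python) =====
-- def get_symmetric_difference_multitask_Ss(task_list, codes):
--     """Creates Ss where control bits are not one-hot-encoded (combined parity of several tasks).
--
--     Takes a symmetric difference of the task_list and codes to get Ss, the subsets of [1, ..., n] to compute sparse parities on.
--
--     Parameters
--     ----------
--     task_list : list of lists of ints
--         The tasks to combine.
--     codes : list of lists of int
--         The subtask indices which the batch will consist of.
--     Returns
--     -------
--     Ss : list of lists of ints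
--         Subsets of [1, ... n] to compute sparse parities on.
--     """
--     Ss = []
--
--     task_set = [set(task) for task in task_list]
--
--     for code in codes:
--         S = set()
--         for subtask in code:
--             S = S ^ task_set[subtask]
--         Ss.append(sorted(list(S)))
--     return Ss
-- ===== SOURCE B (Python) =====
-- def get_symmetric_difference_multitask_Ss(task_list, codes):
--     """Count-then-parity-filter reimplementation: for each code, tally how many
--     selected task sets contain each element, then keep elements with odd tallies."""
--     Ss = []
--     for code in codes:
--         counts = {}
--         for subtask in code:
--             for x in set(task_list[subtask]):
--                 counts[x] = counts.get(x, 0) + 1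
--         Ss.append(sorted(x for x, c in counts.items() if c % 2 == 1))
--     return Ss
-- ===== Notes on version B (the rewrite author's own statement) =====
-- stated objective: alternative
-- what changed: B replaces A's running symmetric-difference accumulator (S = S ^ task_set[subtask]) with a two-pass count-table decomposition: one pass tallies, per code, how many selected task sets contain each element, and a separate pass keeps exactly the elements with odd tallies and sorts them.
import Mathlib
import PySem

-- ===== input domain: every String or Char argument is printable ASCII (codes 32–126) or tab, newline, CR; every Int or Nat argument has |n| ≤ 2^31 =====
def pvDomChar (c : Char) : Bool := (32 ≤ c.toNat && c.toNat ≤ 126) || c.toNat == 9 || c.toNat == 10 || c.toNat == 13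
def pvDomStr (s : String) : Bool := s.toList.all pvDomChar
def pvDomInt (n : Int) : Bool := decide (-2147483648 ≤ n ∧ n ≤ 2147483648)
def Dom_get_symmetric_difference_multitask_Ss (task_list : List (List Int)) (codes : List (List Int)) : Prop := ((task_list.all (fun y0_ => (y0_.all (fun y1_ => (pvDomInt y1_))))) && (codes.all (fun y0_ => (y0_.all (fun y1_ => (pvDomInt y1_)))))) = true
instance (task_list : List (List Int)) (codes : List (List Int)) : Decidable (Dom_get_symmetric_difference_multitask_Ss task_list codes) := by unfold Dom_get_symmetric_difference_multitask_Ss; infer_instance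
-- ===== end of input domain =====

-- B replaces A's running symmetric-difference accumulator with a count-table-then-parity-filter decomposition (objective: alternative, same cost).

-- ===== PORT A =====
def get_symmetric_difference_multitask_Ss (task_list : List (List Int)) (codes : List (List Int)) : List (List Int) :=
  let task_set := task_list.map (fun task => PySem.Set.ofList task)
  codes.foldl (fun Ss code =>
    Ss ++ [PySem.List.sorted
      (code.foldl (fun S subtask => PySem.Set.symmDiff S (PySem.List.pyGetD task_set subtask [])) PySem.Set.empty)
      (fun x => x) false]) []

-- ===== PORT B =====
def get_symmetric_difference_multitask_Ss_alt (task_list : List (List Int)) (codes : List (List Int)) : List (List Int) :=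
  codes.foldl (fun Ss code =>
    let counts : PySem.Dict Int Int := code.foldl (fun d subtask =>
        (PySem.Set.ofList (PySem.List.pyGetD task_list subtask [])).foldl (fun d x => d.modify x 0 (· + 1)) d)
      PySem.Dict.empty
    Ss ++ [PySem.List.sorted
      ((counts.items.filter (fun p => PySem.Int.mod p.2 2 == 1)).map (fun p => p.1))
      (fun x => x) false]) []

-- ===== PRECONDITION & SPEC =====
-- Pre_ excludes exactly the inputs on which the Python A raises IndexError: a code containing a
-- subtask index outside the valid Python index range [-len(task_list), len(task_list)).
def Pre_get_symmetric_difference_multitask_Ss (task_list : List (List Int)) (codes : List (List Int)) : Prop :=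
  ∀ code ∈ codes, ∀ s ∈ code, -(task_list.length : Int) ≤ s ∧ s < (task_list.length : Int)
instance (task_list : List (List Int)) (codes : List (List Int)) : Decidable (Pre_get_symmetric_difference_multitask_Ss task_list codes) := by unfold Pre_get_symmetric_difference_multitask_Ss; infer_instance

def pvWitness_get_symmetric_difference_multitask_Ss : List (List Int) × List (List Int) :=
  ([[1, 2], [2, 3], [3]], [[0, 1], [0, -1, 1], []])

def Spec_get_symmetric_difference_multitask_Ss (task_list : List (List Int)) (codes : List (List Int)) (out : List (List Int)) : Prop := out = get_symmetric_difference_multitask_Ss_alt task_list codes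
instance (task_list : List (List Int)) (codes : List (List Int)) (out : List (List Int)) : Decidable (Spec_get_symmetric_difference_multitask_Ss task_list codes out) := by unfold Spec_get_symmetric_difference_multitask_Ss; infer_instance

-- ===== CLAIM (what is proved, stated in full; the proofs are below) =====
def Claim_equal_get_symmetric_difference_multitask_Ss : Prop := ∀ (task_list : List (List Int)) (codes : List (List Int)), Dom_get_symmetric_difference_multitask_Ss task_list codes → Pre_get_symmetric_difference_multitask_Ss task_list codes → Spec_get_symmetric_difference_multitask_Ss task_list codes (get_symmetric_difference_multitask_Ss task_list codes)

-- ===== LEMMAS AND PROOFS =====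

-- the (deduplicated) task set selected by index `s`
def pvTs (task_list : List (List Int)) (s : Int) : PySem.Set Int :=
  PySem.Set.ofList (PySem.List.pyGetD task_list s [])

-- membership in A's running symmetric difference is parity of the number of selected sets containing x
lemma mem_foldl_symmDiff (tl : List (List Int)) (code : List Int) (S : PySem.Set Int) (x : Int) :
    x ∈ code.foldl (fun S sub => PySem.Set.symmDiff S (pvTs tl sub)) S ↔
      ((x ∈ S) ↔ (code.countP (fun sub => decide (x ∈ pvTs tl sub))) % 2 = 0) := by
  induction code generalizing S with
  | nil => simp
  | cons sub t ih =>
      simp only [List.foldl_cons, ih, PySem.Set.mem_symmDiff]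
      by_cases h : x ∈ pvTs tl sub
      · rw [List.countP_cons_of_pos (by simpa using h)]
        have hpar : (List.countP (fun sub => decide (x ∈ pvTs tl sub)) t + 1) % 2 = 0 ↔
            ¬ (List.countP (fun sub => decide (x ∈ pvTs tl sub)) t) % 2 = 0 := by omega
        rw [hpar]; tauto
      · rw [List.countP_cons_of_neg (by simpa using h)]
        tauto

lemma nodup_foldl_symmDiff (tl : List (List Int)) (code : List Int) (S : PySem.Set Int)
    (hS : S.Nodup) : (code.foldl (fun S sub => PySem.Set.symmDiff S (pvTs tl sub)) S).Nodup := by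
  induction code generalizing S with
  | nil => exact hS
  | cons sub t ih =>
      exact ih _ (PySem.Set.nodup_symmDiff _ _ hS (PySem.Set.nodup_ofList _))

-- B's count table: value at x is the initial value plus the total count of x over the selected sets
lemma getD_counts (tl : List (List Int)) (code : List Int) (d : PySem.Dict Int Int) (x : Int) :
    (code.foldl (fun d sub => (pvTs tl sub).foldl (fun d y => d.modify y 0 (· + 1)) d) d).getD x 0
      = d.getD x 0 + (code.map (fun sub => ((pvTs tl sub).count x : Int))).sum := by
  induction code generalizing d with
  | nil => simp
  | cons sub t ih =>
      simp only [List.foldl_cons, List.map_cons, List.sum_cons, ih,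
        PySem.Dict.getD_foldl_modify_add_one]
      ring

lemma keys_counts_nodup (tl : List (List Int)) (code : List Int) (d : PySem.Dict Int Int)
    (hd : d.keys.Nodup) :
    (code.foldl (fun d sub => (pvTs tl sub).foldl (fun d y => d.modify y 0 (· + 1)) d) d).keys.Nodup := by
  induction code generalizing d with
  | nil => exact hd
  | cons sub t ih =>
      exact ih _ (PySem.Dict.nodup_keys_foldl_modify_key _ (fun y => y) 0 (fun _ _ v => v + 1) d hd)

lemma mem_keys_counts (tl : List (List Int)) (code : List Int) (d : PySem.Dict Int Int) (x : Int) :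
    x ∈ (code.foldl (fun d sub => (pvTs tl sub).foldl (fun d y => d.modify y 0 (· + 1)) d) d).keys ↔
      x ∈ d.keys ∨ ∃ sub ∈ code, x ∈ pvTs tl sub := by
  induction code generalizing d with
  | nil => simp
  | cons sub t ih =>
      simp only [List.foldl_cons, ih, PySem.Dict.keys_foldl_modify, PySem.Set.mem_update,
        List.mem_cons]
      constructor
      · rintro ((h | h) | ⟨s, hs, hx⟩)
        · exact Or.inl h
        · exact Or.inr ⟨sub, Or.inl rfl, h⟩
        · exact Or.inr ⟨s, Or.inr hs, hx⟩
      · rintro (h | ⟨s, (rfl | hs), hx⟩)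
        · exact Or.inl (Or.inl h)
        · exact Or.inl (Or.inr hx)
        · exact Or.inr ⟨s, hs, hx⟩

-- total count of x over the selected sets = number of selected sets containing x (each set is Nodup)
lemma sum_count_eq_countP (tl : List (List Int)) (code : List Int) (x : Int) :
    (code.map (fun sub => ((pvTs tl sub).count x : Int))).sum
      = (code.countP (fun sub => decide (x ∈ pvTs tl sub)) : Int) := by
  induction code with
  | nil => simp
  | cons sub t ih =>
      simp only [List.map_cons, List.sum_cons, ih]
      by_cases h : x ∈ pvTs tl sub
      · have hnd : (pvTs tl sub).Nodup := PySem.Set.nodup_ofList _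
        rw [List.count_eq_one_of_mem hnd h, List.countP_cons_of_pos (by simpa using h)]
        push_cast; ring
      · rw [List.count_eq_zero_of_not_mem h, List.countP_cons_of_neg (by simpa using h)]
        push_cast; ring

-- per-code equality: both branch bodies produce the same sorted list
lemma percode (tl : List (List Int)) (code : List Int) :
    PySem.List.sorted
      (code.foldl (fun S sub => PySem.Set.symmDiff S (PySem.List.pyGetD (tl.map (fun task => PySem.Set.ofList task)) sub [])) PySem.Set.empty)
      (fun x => x) false
    = PySem.List.sorted
      ((((code.foldl (fun d sub => (PySem.Set.ofList (PySem.List.pyGetD tl sub [])).foldl (fun d x => d.modify x 0 (· + 1)) d) PySem.Dict.empty : PySem.Dict Int Int)).items.filter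
          (fun p => PySem.Int.mod p.2 2 == 1)).map (fun p => p.1))
      (fun x => x) false := by
  have hget : ∀ sub : Int, PySem.List.pyGetD (tl.map (fun task => PySem.Set.ofList task)) sub []
      = pvTs tl sub := by
    intro sub
    exact PySem.List.pyGetD_map (fun task => PySem.Set.ofList task) tl sub []
  have hB : ∀ sub : Int, PySem.Set.ofList (PySem.List.pyGetD tl sub []) = pvTs tl sub :=
    fun _ => rfl
  simp only [hget, hB]
  set cnt : PySem.Dict Int Int :=
    code.foldl (fun d sub => (pvTs tl sub).foldl (fun d y => d.modify y 0 (· + 1)) d) PySem.Dict.empty with hcnt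
  have hkn : cnt.keys.Nodup := keys_counts_nodup tl code _ (by simp [PySem.Dict.keys_empty])
  have hitems : cnt.items = cnt.keys.map (fun k => (k, cnt.getD k 0)) :=
    PySem.Dict.items_eq_map_keys cnt hkn 0
  have hblist : (cnt.items.filter (fun p => PySem.Int.mod p.2 2 == 1)).map (fun p => p.1)
      = cnt.keys.filter (fun k => PySem.Int.mod (cnt.getD k 0) 2 == 1) := by
    rw [hitems, List.filter_map, List.map_map]
    simp [Function.comp_def]
  rw [hblist]
  apply PySem.List.sorted_eq_sorted_of_perm _ _ _ (fun a b h => h)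
  refine (List.perm_ext_iff_of_nodup
      (nodup_foldl_symmDiff tl code PySem.Set.empty List.nodup_nil)
      (List.Nodup.filter _ hkn)).mpr ?_
  intro x
  have hgd : cnt.getD x 0 = (code.countP (fun sub => decide (x ∈ pvTs tl sub)) : Int) := by
    rw [hcnt, getD_counts, sum_count_eq_countP]
    simp [PySem.Dict.getD_empty]
  rw [mem_foldl_symmDiff, List.mem_filter, mem_keys_counts, hgd]
  have hmod : (PySem.Int.mod ((code.countP (fun sub => decide (x ∈ pvTs tl sub)) : Nat) : Int) 2 == 1) = true
      ↔ (code.countP (fun sub => decide (x ∈ pvTs tl sub))) % 2 = 1 := by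
    rw [show (2 : Int) = ((2 : Nat) : Int) from rfl, PySem.Int.mod_natCast]
    simp only [beq_iff_eq]
    omega
  constructor
  · intro h
    have hodd : (code.countP (fun sub => decide (x ∈ pvTs tl sub))) % 2 = 1 := by
      rcases Nat.mod_two_eq_zero_or_one (code.countP (fun sub => decide (x ∈ pvTs tl sub))) with h0 | h1
      · exact absurd (h.mpr h0) (List.not_mem_nil)
      · exact h1
    have hpos : 0 < code.countP (fun sub => decide (x ∈ pvTs tl sub)) := by omega
    rcases List.countP_pos_iff.mp hpos with ⟨s, hs, hx⟩
    exact ⟨Or.inr ⟨s, hs, of_decide_eq_true hx⟩, hmod.mpr hodd⟩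
  · rintro ⟨-, hOdd⟩
    have h1 := hmod.mp hOdd
    constructor
    · intro h; exact absurd h (List.not_mem_nil)
    · intro h0; omega

-- ===== VERDICT (by name: the statement is the Claim_ definition above) =====
theorem get_symmetric_difference_multitask_Ss_spec : Claim_equal_get_symmetric_difference_multitask_Ss := by
  intro task_list codes _ _
  unfold Spec_get_symmetric_difference_multitask_Ss
  unfold get_symmetric_difference_multitask_Ss get_symmetric_difference_multitask_Ss_alt
  rw [PySem.List.foldl_append_singleton_eq_map, PySem.List.foldl_append_singleton_eq_map]
  simp only [List.nil_append]
  exact List.map_congr_left (fun code _ => percode task_list code)
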